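-- pv_equiv track=rewrite | github.com/alan-turing-institute/advent-of-code-2022 | day-06/python_radka-j/day06.py | evaluate
-- ===== SOURCE A (Python) =====
-- def evaluate(my_str, n_required):
--     """
--     Return index at which message starts.
--
--     my_str: str
--         message to parse
--     n_required: int
--         number of unique characters required to indicate start of message
--     """
--
--     for i, char in enumerate(my_str):
--         # do nothing until have n_required characters
--         if i <= n_required - 1:
--             continue
--         else:
--             # check number of unique characters in substring
--             substring = my_str[i-n_required:i]
--             n_unique = len(set(substring))
--             if n_unique==n_required:
--                 return i
--     # nothing found
--     return -1
-- ===== SOURCE B (Python) =====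
-- def evaluate(my_str, n_required):
--     """
--     Return index at which message starts.
--
--     Sliding window with a char frequency counter: the distinct-character
--     count is updated incrementally instead of rebuilding a set per index.
--     """
--     n = n_required
--     L = len(my_str)
--     if n < 0 or n >= L:
--         return -1
--     counts = {}
--     distinct = 0
--     for c in my_str[:n]:
--         counts[c] = counts.get(c, 0) + 1
--         if counts[c] == 1:
--             distinct += 1
--     for i, (add, rem) in enumerate(zip(my_str[n:], my_str), n):
--         if distinct == n:
--             return i
--         counts[add] = counts.get(add, 0) + 1
--         if counts[add] == 1:
--             distinct += 1
--         counts[rem] -= 1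
--         if counts[rem] == 0:
--             distinct -= 1
--     return -1
-- ===== Notes on version B (the rewrite author's own statement) =====
-- stated objective: faster
-- what changed: Replaced A's per-index rebuild of set(my_str[i-n:i]) with a single sliding-window pass that maintains a char frequency counter and updates the distinct-character count incrementally.
import Mathlib
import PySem

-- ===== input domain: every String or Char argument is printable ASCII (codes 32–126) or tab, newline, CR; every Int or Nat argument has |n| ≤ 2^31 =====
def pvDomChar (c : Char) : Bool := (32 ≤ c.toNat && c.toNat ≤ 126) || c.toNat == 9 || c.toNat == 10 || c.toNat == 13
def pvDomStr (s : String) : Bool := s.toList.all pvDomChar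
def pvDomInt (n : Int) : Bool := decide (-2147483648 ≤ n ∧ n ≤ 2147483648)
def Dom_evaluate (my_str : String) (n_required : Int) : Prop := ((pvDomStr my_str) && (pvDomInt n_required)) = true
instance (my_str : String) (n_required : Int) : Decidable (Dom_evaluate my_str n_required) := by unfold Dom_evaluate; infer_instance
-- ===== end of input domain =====

-- B replaces A's per-index set construction (O(L·n)) with a sliding window and an
-- incrementally maintained char-frequency counter / distinct count (O(L)).

-- ===== PORT A =====
-- the 'for i, char in enumerate(my_str)' loop with its early return
def evalA_go (cs : List Char) (n : Int) : List (Int × Char) → Int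
  | [] => -1
  | (i, _) :: rest =>
    if i ≤ n - 1 then evalA_go cs n rest
    else
      -- substring = my_str[i-n:i]; n_unique = len(set(substring))
      let substring := PySem.List.slice cs (some (i - n)) (some i)
      let n_unique : Int := (PySem.Set.ofList substring).length
      if n_unique == n then i else evalA_go cs n rest

def evaluate (my_str : String) (n_required : Int) : Int :=
  evalA_go my_str.toList n_required (PySem.List.enumerate my_str.toList 0)

-- ===== PORT B =====
-- counts[c] = counts.get(c, 0) + 1; if counts[c] == 1: distinct += 1
def evalB_add (st : PySem.Dict Char Int × Int) (c : Char) : PySem.Dict Char Int × Int :=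
  let cnt := st.1.getD c 0 + 1
  (st.1.insert c cnt, if cnt == 1 then st.2 + 1 else st.2)

-- the 'for i, (add, rem) in enumerate(zip(my_str[n:], my_str), n)' loop
def evalB_go (n : Int) : List (Int × Char × Char) → PySem.Dict Char Int × Int → Int
  | [], _ => -1
  | (i, add, rem) :: rest, (counts, distinct) =>
    if distinct == n then i
    else
      let c1 := counts.getD add 0 + 1
      let counts1 := counts.insert add c1
      let d1 := if c1 == 1 then distinct + 1 else distinct
      -- counts[rem] -= 1 (rem is always present here, so get-with-default is exact)
      let c2 := counts1.getD rem 0 - 1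
      let counts2 := counts1.insert rem c2
      let d2 := if c2 == 0 then d1 - 1 else d1
      evalB_go n rest (counts2, d2)

def evaluate_alt (my_str : String) (n_required : Int) : Int :=
  let cs := my_str.toList
  let L : Int := cs.length
  if n_required < 0 ∨ L ≤ n_required then -1
  else
    let st := (PySem.List.slice cs none (some n_required)).foldl evalB_add (PySem.Dict.empty, 0)
    evalB_go n_required
      (PySem.List.enumerate ((PySem.List.slice cs (some n_required) none).zip cs) n_required) st

-- ===== PRECONDITION & SPEC =====
def Spec_evaluate (my_str : String) (n_required : Int) (out : Int) : Prop := out = evaluate_alt my_str n_required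
instance (my_str : String) (n_required : Int) (out : Int) : Decidable (Spec_evaluate my_str n_required out) := by unfold Spec_evaluate; infer_instance

-- ===== CLAIM (what is proved, stated in full; the proofs are below) =====
def Claim_equal_evaluate : Prop := ∀ (my_str : String) (n_required : Int), Dom_evaluate my_str n_required → Spec_evaluate my_str n_required (evaluate my_str n_required)


-- ===== LEMMAS AND PROOFS =====

-- A's loop returns -1 once every remaining index is still in the warm-up branch
lemma evalA_all_skip (cs : List Char) (n : Int) :
    ∀ l : List (Int × Char), (∀ p ∈ l, p.1 ≤ n - 1) → evalA_go cs n l = -1 := by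
  intro l
  induction l with
  | nil => intro _; rfl
  | cons p rest ih =>
    intro h
    obtain ⟨i, c⟩ := p
    have hi : i ≤ n - 1 := h (i, c) (by simp)
    simp only [evalA_go, if_pos hi]
    exact ih (fun q hq => h q (by simp [hq]))

-- for negative n the uniqueness test can never succeed (a set size is ≥ 0)
lemma evalA_neg (cs : List Char) {n : Int} (hn : n < 0) :
    ∀ l : List (Int × Char), evalA_go cs n l = -1 := by
  intro l
  induction l with
  | nil => rfl
  | cons p rest ih =>
    obtain ⟨i, c⟩ := p
    simp only [evalA_go]
    have hne : (((PySem.Set.ofList (PySem.List.slice cs (some (i - n)) (some i))).length : Int) == n) = false := by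
      simp only [beq_eq_false_iff_ne, ne_eq]
      intro h
      omega
    rw [hne]
    simp only [Bool.false_eq_true, if_false, ih, ite_self]

-- len(set(w)) is the number of distinct characters of w
lemma setLen_eq_card (w : List Char) : (PySem.Set.ofList w).length = w.toFinset.card := by
  have hnd : (PySem.Set.ofList w).Nodup := PySem.Set.nodup_ofList w
  have hfs : (PySem.Set.ofList w).toFinset = w.toFinset := by
    ext c; simp [PySem.Set.mem_ofList]
  rw [← hfs, List.toFinset_card_of_nodup hnd]

-- loop invariant of B: counts is the frequency table of the window, d its distinct count
def BInv (counts : PySem.Dict Char Int) (d : Int) (w : List Char) : Prop :=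
  (∀ c, counts.getD c 0 = (w.count c : Int)) ∧ d = (w.toFinset.card : Int)

lemma BInv_add {counts : PySem.Dict Char Int} {d : Int} {w : List Char} (c : Char)
    (h : BInv counts d w) :
    BInv (evalB_add (counts, d) c).1 (evalB_add (counts, d) c).2 (w ++ [c]) := by
  obtain ⟨hcnt, hd⟩ := h
  constructor
  · intro x
    simp only [evalB_add, PySem.Dict.getD_insert]
    by_cases hx : x = c
    · subst hx; simp [hcnt x, List.count_append]
    · simp [hx, hcnt x, List.count_append, Ne.symm hx]
  · simp only [evalB_add, hcnt c, hd]
    have hcard : (w ++ [c]).toFinset.card = if c ∈ w then w.toFinset.card else w.toFinset.card + 1 := by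
      rw [List.toFinset_append]
      simp [Finset.card_insert_eq_ite]
    rw [hcard]
    by_cases hm : c ∈ w
    · have h0 : w.count c ≠ 0 := by simpa [List.count_eq_zero] using hm
      have hb : ((w.count c : Int) + 1 == 1) = false := by
        simp only [beq_eq_false_iff_ne, ne_eq]; omega
      simp [hb, hm]
    · have h0 : w.count c = 0 := List.count_eq_zero.mpr hm
      have hb : ((w.count c : Int) + 1 == 1) = true := by
        simp only [beq_iff_eq]; omega
      simp [hm, h0]

lemma BInv_add' {st : PySem.Dict Char Int × Int} {w : List Char} (c : Char)
    (h : BInv st.1 st.2 w) :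
    BInv (evalB_add st c).1 (evalB_add st c).2 (w ++ [c]) := by
  obtain ⟨counts, d⟩ := st
  exact BInv_add c h

lemma BInv_foldl :
    ∀ (l : List Char) (st : PySem.Dict Char Int × Int) (w : List Char),
      BInv st.1 st.2 w →
      BInv (l.foldl evalB_add st).1 (l.foldl evalB_add st).2 (w ++ l) := by
  intro l
  induction l with
  | nil => intro st w h; simpa using h
  | cons c rest ih =>
    intro st w h
    rw [List.foldl_cons, List.append_cons]
    exact ih (evalB_add st c) (w ++ [c]) (BInv_add' c h)

lemma BInv_step (counts : PySem.Dict Char Int) (d : Int) (rem : Char) (t : List Char) (add : Char)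
    (h : BInv counts d (rem :: t)) :
    BInv ((counts.insert add (counts.getD add 0 + 1)).insert rem
            ((counts.insert add (counts.getD add 0 + 1)).getD rem 0 - 1))
         (if ((counts.insert add (counts.getD add 0 + 1)).getD rem 0 - 1) == 0
          then (if (counts.getD add 0 + 1) == 1 then d + 1 else d) - 1
          else (if (counts.getD add 0 + 1) == 1 then d + 1 else d))
         (t ++ [add]) := by
  obtain ⟨hcnt, hd⟩ := h
  have hw' : ∀ x : Char, (counts.insert add (counts.getD add 0 + 1)).getD x 0
      = (((rem :: t) ++ [add]).count x : Int) := by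
    intro x
    rw [PySem.Dict.getD_insert]
    by_cases hx : x = add
    · rw [if_pos hx, hcnt add, hx]
      have h5 : ((rem :: t) ++ [add]).count add = (rem :: t).count add + 1 := by
        rw [List.count_append]
        simp
      rw [h5]; push_cast; ring
    · rw [if_neg hx, hcnt x]
      have h5 : ((rem :: t) ++ [add]).count x = (rem :: t).count x := by
        simp [List.count_append, List.count_cons, Ne.symm hx]
      rw [h5]
  have hcount_cons : ∀ x : Char, ((rem :: t) ++ [add]).count x
      = (t ++ [add]).count x + (if x = rem then 1 else 0) := by
    intro x
    by_cases hxr : x = rem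
    · subst hxr; simp [List.count_cons]
    · simp [List.count_cons, hxr, Ne.symm hxr]
  constructor
  · intro x
    rw [PySem.Dict.getD_insert]
    by_cases hx : x = rem
    · subst hx
      rw [if_pos rfl, hw' x, hcount_cons x, if_pos rfl]
      push_cast; ring
    · rw [if_neg hx, hw' x, hcount_cons x, if_neg hx]
      push_cast; ring
  · -- the distinct count
    have hc1 : ((counts.getD add 0 + 1) == 1) = decide (add ∉ (rem :: t)) := by
      rw [hcnt add]
      by_cases hm : add ∈ rem :: t
      · have h0 : (rem :: t).count add ≠ 0 := by
          rw [ne_eq, List.count_eq_zero]; exact fun hc => hc hm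
        simp only [hm, not_true_eq_false, decide_false, beq_eq_false_iff_ne, ne_eq]
        omega
      · have h0 : (rem :: t).count add = 0 := List.count_eq_zero.mpr hm
        simp [hm, h0]
    have hc2 : (((counts.insert add (counts.getD add 0 + 1)).getD rem 0 - 1) == 0)
        = decide (rem ∉ (t ++ [add])) := by
      rw [hw' rem, hcount_cons rem, if_pos rfl]
      by_cases hm : rem ∈ t ++ [add]
      · have h0 : (t ++ [add]).count rem ≠ 0 := by
          rw [ne_eq, List.count_eq_zero]; exact fun hc => hc hm
        simp only [hm, not_true_eq_false, decide_false, beq_eq_false_iff_ne, ne_eq]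
        push_cast; omega
      · have h0 : (t ++ [add]).count rem = 0 := List.count_eq_zero.mpr hm
        simp [hm, h0]
    rw [hc1, hc2, hd]
    clear hc1 hc2 hd hcnt hw' hcount_cons
    have e1 : (rem :: t).toFinset.card
        = if rem ∈ t then t.toFinset.card else t.toFinset.card + 1 := by
      simp [Finset.card_insert_eq_ite, List.mem_toFinset]
    have e2 : (t ++ [add]).toFinset.card
        = if add ∈ t then t.toFinset.card else t.toFinset.card + 1 := by
      rw [List.toFinset_append]
      simp [Finset.card_insert_eq_ite, List.mem_toFinset]
    by_cases h2 : rem ∈ t <;> by_cases h3 : add ∈ t <;> by_cases h1 : add = rem <;>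
      simp_all [List.mem_cons] <;>
      (try exact fun hh => h1 hh.symm)

-- A skips every index below k
lemma evalA_skip (cs : List Char) (k : Nat) (hkL : k ≤ cs.length) :
    ∀ (m j : Nat), j + m = k →
      evalA_go cs (k : Int) (PySem.List.enumerate (cs.drop j) (j : Int)) =
      evalA_go cs (k : Int) (PySem.List.enumerate (cs.drop k) (k : Int)) := by
  intro m
  induction m with
  | zero =>
    intro j hj
    have hjk : j = k := by omega
    rw [hjk]
  | succ m ih =>
    intro j hj
    have hjL : j < cs.length := by omega
    rw [List.drop_eq_getElem_cons hjL, PySem.List.enumerate_cons]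
    simp only [evalA_go]
    have hle : (j : Int) ≤ (k : Int) - 1 := by omega
    rw [if_pos hle]
    have hc : ((j : Int) + 1) = ((j + 1 : Nat) : Int) := by push_cast; ring
    rw [hc]
    exact ih (j + 1) (by omega)

-- the main simulation: from index j on, A's rescan loop and B's sliding loop agree
lemma AB_main (cs : List Char) (k : Nat) :
    ∀ (m j : Nat) (counts : PySem.Dict Char Int) (d : Int),
      k ≤ j → j + m = cs.length →
      BInv counts d ((cs.drop (j - k)).take k) →
      evalA_go cs (k : Int) (PySem.List.enumerate (cs.drop j) (j : Int)) =
      evalB_go (k : Int)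
        (PySem.List.enumerate (((cs.drop k).zip cs).drop (j - k)) (j : Int)) (counts, d) := by
  intro m
  induction m with
  | zero =>
    intro j counts d hkj hj hinv
    have h1 : cs.drop j = [] := by
      apply List.drop_eq_nil_of_le; omega
    have h2 : ((cs.drop k).zip cs).drop (j - k) = [] := by
      apply List.drop_eq_nil_of_le
      simp [List.length_zip]; omega
    rw [h1, h2]; rfl
  | succ m ih =>
    intro j counts d hkj hj hinv
    have hjL : j < cs.length := by omega
    obtain ⟨hcnt, hd⟩ := hinv
    set W := (cs.drop (j - k)).take k with hW
    rw [List.drop_eq_getElem_cons hjL, PySem.List.enumerate_cons]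
    have hzl : j - k < ((cs.drop k).zip cs).length := by
      simp [List.length_zip]; omega
    rw [List.drop_eq_getElem_cons hzl, PySem.List.enumerate_cons]
    have hget : ((cs.drop k).zip cs)[j - k] = (cs[j], cs[j - k]) := by
      have h1 : j - k < (cs.drop k).length := by simp; omega
      have h2 : j - k < cs.length := by omega
      simp [List.getElem_zip, List.getElem_drop]
      congr 1
      omega
    rw [hget]
    simp only [evalA_go, evalB_go]
    have hnle : ¬ ((j : Int) ≤ (k : Int) - 1) := by omega
    rw [if_neg hnle]
    have hsub : PySem.List.slice cs (some ((j : Int) - (k : Int))) (some (j : Int)) = W := by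
      have hcast : ((j : Int) - (k : Int)) = ((j - k : Nat) : Int) := by omega
      rw [hcast, PySem.List.slice_natCast]
      have hjk : j - (j - k) = k := by omega
      rw [hjk]
    rw [hsub]
    have htest : (((PySem.Set.ofList W).length : Int) == (k : Int)) = (d == (k : Int)) := by
      rw [setLen_eq_card, hd]
    rw [htest]
    by_cases hdk : (d == (k : Int)) = true
    · rw [hdk]; simp
    · rw [Bool.not_eq_true] at hdk
      rw [hdk]
      simp only [Bool.false_eq_true, if_false]
      have hk0 : k ≠ 0 := by
        intro h0
        subst h0
        simp [hW] at hd
        subst hd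
        simp at hdk
      obtain ⟨k', rfl⟩ : ∃ k', k = k' + 1 := ⟨k - 1, by omega⟩
      have hjkL : j - (k' + 1) < cs.length := by omega
      have hdropc : cs.drop (j - (k' + 1)) = cs[j - (k' + 1)] :: cs.drop (j - (k' + 1) + 1) :=
        List.drop_eq_getElem_cons hjkL
      set t := (cs.drop (j - (k' + 1) + 1)).take k' with ht
      have hWcons : W = cs[j - (k' + 1)] :: t := by
        rw [hW, hdropc, List.take_succ_cons]
      have hlen2 : k' < (cs.drop (j - (k' + 1) + 1)).length := by simp; omega
      have hW' : (cs.drop (j + 1 - (k' + 1))).take (k' + 1) = t ++ [cs[j]] := by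
        have h1 : j + 1 - (k' + 1) = j - (k' + 1) + 1 := by omega
        have h4 : j - (k' + 1) + 1 + k' = j := by omega
        rw [h1, List.take_add_one, List.getElem?_eq_getElem hlen2, ht]
        simp only [List.getElem_drop]
        simp [h4]
      -- invariant after the update
      have hstep := BInv_step counts d (cs[j - (k' + 1)]) t (cs[j]) (by rw [← hWcons]; exact ⟨hcnt, hd⟩)
      rw [← hW'] at hstep
      have hrec := ih (j + 1)
        ((counts.insert cs[j] (counts.getD cs[j] 0 + 1)).insert (cs[j - (k' + 1)])
          ((counts.insert cs[j] (counts.getD cs[j] 0 + 1)).getD (cs[j - (k' + 1)]) 0 - 1))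
        (if ((counts.insert cs[j] (counts.getD cs[j] 0 + 1)).getD (cs[j - (k' + 1)]) 0 - 1) == 0
         then (if (counts.getD cs[j] 0 + 1) == 1 then d + 1 else d) - 1
         else (if (counts.getD cs[j] 0 + 1) == 1 then d + 1 else d))
        (by omega) (by omega) hstep
      have hcast1 : ((j : Int) + 1) = ((j + 1 : Nat) : Int) := by push_cast; ring
      have hcast2 : j + 1 - (k' + 1) = j - (k' + 1) + 1 := by omega
      rw [hcast1]
      rw [hcast2] at hrec
      exact hrec

-- ===== VERDICT (by name: the statement is the Claim_ definition above) =====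
theorem evaluate_spec : Claim_equal_evaluate := by
  unfold Claim_equal_evaluate Spec_evaluate
  intro my_str n _
  simp only [evaluate, evaluate_alt]
  by_cases h : n < 0 ∨ (my_str.toList.length : Int) ≤ n
  · rw [if_pos h]
    rcases h with h | h
    · exact evalA_neg my_str.toList h _
    · apply evalA_all_skip
      intro p hp
      rw [PySem.List.mem_enumerate_iff] at hp
      obtain ⟨kk, hkk, rfl⟩ := hp
      simp only [zero_add]
      omega
  · rw [if_neg h]
    rw [not_or, not_lt, not_le] at h
    obtain ⟨h0, hL⟩ := h
    obtain ⟨k, rfl⟩ : ∃ k : Nat, n = (k : Int) := ⟨n.toNat, by omega⟩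
    have hkL : k < my_str.toList.length := by exact_mod_cast hL
    have hA : evalA_go my_str.toList (k : Int) (PySem.List.enumerate my_str.toList 0) =
        evalA_go my_str.toList (k : Int)
          (PySem.List.enumerate (my_str.toList.drop k) (k : Int)) := by
      have hs := evalA_skip my_str.toList k (le_of_lt hkL) k 0 (by omega)
      simpa using hs
    have hs1 : PySem.List.slice my_str.toList none (some (k : Int)) = my_str.toList.take k :=
      PySem.List.slice_to_natCast my_str.toList k
    have hs2 : PySem.List.slice my_str.toList (some (k : Int)) none = my_str.toList.drop k :=
      PySem.List.slice_from_natCast my_str.toList k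
    have hinv0 : BInv PySem.Dict.empty 0 ([] : List Char) := by
      constructor
      · intro c; simp
      · simp
    have hinv := BInv_foldl (my_str.toList.take k) (PySem.Dict.empty, 0) [] hinv0
    rw [hA, hs1, hs2]
    have hmain := AB_main my_str.toList k (my_str.toList.length - k) k
      ((my_str.toList.take k).foldl evalB_add (PySem.Dict.empty, 0)).1
      ((my_str.toList.take k).foldl evalB_add (PySem.Dict.empty, 0)).2
      (le_refl k) (by omega)
      (by simpa using hinv)
    simpa using hmain
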